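-- pv_equiv track=rewrite | github.com/Gili-Levy/TAU-project2 | hw2_316296771.py | check_goldbach_for_range
-- ===== SOURCE A (Python) =====
-- def check_goldbach_for_range(limit, primes_set):
-- 	for i in range (4,limit,2):
-- 		found = False
-- 		for num in primes_set: #go through the numbers in the set
-- 			if (i-num) in primes_set:
-- 				found = True
-- 				break
-- 		if found == False:
-- 			return False
-- 	return True
-- ===== SOURCE B (Python) =====
-- def check_goldbach_for_range(limit, primes_set):
--     sums = {a + b for a in primes_set for b in primes_set}
--     return all(i in sums for i in range(4, limit, 2))
-- ===== Notes on version B (the rewrite author's own statement) =====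
-- stated objective: alternative
-- what changed: B precomputes the set of all pairwise sums of the primes once and then makes a single membership pass over the even numbers, instead of searching the prime set anew for a partner of each even number.
import Mathlib
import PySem

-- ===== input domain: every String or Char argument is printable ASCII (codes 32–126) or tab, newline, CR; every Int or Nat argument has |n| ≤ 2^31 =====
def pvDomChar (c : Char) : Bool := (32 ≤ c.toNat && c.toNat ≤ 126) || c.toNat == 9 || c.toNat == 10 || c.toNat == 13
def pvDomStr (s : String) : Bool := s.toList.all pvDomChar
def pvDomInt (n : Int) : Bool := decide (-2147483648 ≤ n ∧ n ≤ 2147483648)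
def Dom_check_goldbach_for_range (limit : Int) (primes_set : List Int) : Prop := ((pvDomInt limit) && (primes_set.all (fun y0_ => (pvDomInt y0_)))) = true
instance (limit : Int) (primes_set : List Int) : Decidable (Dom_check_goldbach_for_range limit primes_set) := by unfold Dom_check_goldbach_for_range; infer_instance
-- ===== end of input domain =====

-- B builds the set of all pairwise sums of the primes once and checks each even number against it,
-- instead of A's per-number search for a Goldbach partner (alternative decomposition; return values equal).


-- ===== PORT A =====
-- inner 'for num in primes_set: if (i-num) in primes_set: found = True; break'
def pvInnerA (i : Int) (primes_set : List Int) : List Int → Bool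
  | [] => false
  | num :: rest => if primes_set.contains (i - num) then true else pvInnerA i primes_set rest

-- outer 'for i in range(4, limit, 2): … if found == False: return False' / 'return True';
-- range(4, limit, 2) is iterated lazily with early return, as in Python
def pvOuterA (primes_set : List Int) (limit i : Int) : Bool :=
  if _h : i < limit then
    let found := pvInnerA i primes_set primes_set
    if found = false then false else pvOuterA primes_set limit (i + 2)
  else true
termination_by (limit - i).toNat
decreasing_by omega

def check_goldbach_for_range (limit : Int) (primes_set : List Int) : Bool :=
  pvOuterA primes_set limit 4

-- ===== PORT B =====
-- 'all(i in sums for i in range(4, limit, 2))' — lazy generator, stops at the first miss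
def pvAllB (sums : List Int) (limit i : Int) : Bool :=
  if _h : i < limit then
    if sums.contains i then pvAllB sums limit (i + 2) else false
  else true
termination_by (limit - i).toNat
decreasing_by omega

def check_goldbach_for_range_alt (limit : Int) (primes_set : List Int) : Bool :=
  let sums := PySem.Set.ofList (primes_set.flatMap (fun a => primes_set.map (fun b => a + b)))
  pvAllB sums limit 4

-- ===== PRECONDITION & SPEC =====
def Spec_check_goldbach_for_range (limit : Int) (primes_set : List Int) (out : Bool) : Prop := out = check_goldbach_for_range_alt limit primes_set
instance (limit : Int) (primes_set : List Int) (out : Bool) : Decidable (Spec_check_goldbach_for_range limit primes_set out) := by unfold Spec_check_goldbach_for_range; infer_instance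

-- ===== CLAIM (what is proved, stated in full; the proofs are below) =====
def Claim_equal_check_goldbach_for_range : Prop := ∀ (limit : Int) (primes_set : List Int), Dom_check_goldbach_for_range limit primes_set → Spec_check_goldbach_for_range limit primes_set (check_goldbach_for_range limit primes_set)

-- ===== LEMMAS AND PROOFS =====
theorem pvInnerA_eq_any (i : Int) (ps : List Int) (l : List Int) :
    pvInnerA i ps l = l.any (fun num => ps.contains (i - num)) := by
  induction l with
  | nil => rfl
  | cons num rest ih =>
      simp only [pvInnerA, List.any_cons, ih]
      cases h : ps.contains (i - num) <;> simp [h]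

theorem pvFound_eq_sums (i : Int) (ps : List Int) :
    pvInnerA i ps ps
      = List.contains (PySem.Set.ofList (ps.flatMap (fun a => ps.map (fun b => a + b)))) i := by
  rw [pvInnerA_eq_any, Bool.eq_iff_iff]
  simp only [List.any_eq_true, PySem.Set.contains, List.contains_eq_mem, List.contains_iff_mem,
    decide_eq_true_eq, PySem.Set.mem_ofList, List.mem_flatMap, List.mem_map]
  constructor
  · rintro ⟨num, hnum, hmem⟩
    exact ⟨num, hnum, i - num, hmem, by ring⟩
  · rintro ⟨a, ha, b, hb, hab⟩
    refine ⟨a, ha, ?_⟩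
    have h2 : i - a = b := by omega
    rwa [h2]

theorem pvOuter_eq_all (n : Nat) : ∀ (ps : List Int) (limit i : Int), (limit - i).toNat ≤ n →
    pvOuterA ps limit i
      = pvAllB (PySem.Set.ofList (ps.flatMap (fun a => ps.map (fun b => a + b)))) limit i := by
  induction n with
  | zero =>
      intro ps limit i hle
      have hge : ¬ i < limit := by omega
      rw [pvOuterA, pvAllB]
      simp [hge]
  | succ n ih =>
      intro ps limit i hle
      rw [pvOuterA, pvAllB]
      by_cases h : i < limit
      · simp only [h, dif_pos, pvFound_eq_sums]
        generalize List.contains (PySem.Set.ofList (ps.flatMap (fun a => ps.map (fun b => a + b)))) i = c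
        cases c
        · rfl
        · simpa using ih ps limit (i + 2) (by omega)
      · simp [h]

-- ===== VERDICT (by name: the statement is the Claim_ definition above) =====
theorem check_goldbach_for_range_spec : Claim_equal_check_goldbach_for_range := by
  intro limit ps _
  unfold Spec_check_goldbach_for_range check_goldbach_for_range check_goldbach_for_range_alt
  exact pvOuter_eq_all (limit - 4).toNat ps limit 4 (le_refl _)
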